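-- pv_equiv track=rewrite | github.com/ptsteadman/notebook | programs/py/keyword-highlight.py | highlight_overlapping_no_regex_alt2
-- ===== SOURCE A (Python) =====
-- from typing import List
--
-- def highlight_overlapping_no_regex_alt2(keywords: List[str], text: str) -> str:
--     """
--     Alternative implementation using list comprehension and str.count().
--     More functional programming style.
--     """
--     if not text:
--         return ""
--
--     # Filter out empty keywords
--     valid_keywords = [kw for kw in keywords if kw]
--     if not valid_keywords:
--         return text
--
--     # Find all matches using explicit position tracking
--     matches = []
--     for keyword in valid_keywords:
--         pos = 0
--         while pos < len(text):
--             found_pos = text.find(keyword, pos)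
--             if found_pos == -1:
--                 break
--             matches.append((found_pos, found_pos + len(keyword), keyword))
--             pos = found_pos + 1
--
--     if not matches:
--         return text
--
--     # Sort matches by position
--     matches.sort(key=lambda x: x[0])
--
--     # Merge overlapping spans
--     merged = [matches[0]]
--     for start, end, keyword in matches[1:]:
--         if start <= merged[-1][1]:
--             # Overlap detected, extend the span
--             merged[-1] = (merged[-1][0], max(merged[-1][1], end), merged[-1][2])
--         else:
--             merged.append((start, end, keyword))
--
--     # Build result
--     result = []
--     last_end = 0
--     for start, end, keyword in merged:
--         result.append(text[last_end:start])
--         result.append(f"<b>{text[start:end]}</b>")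
--         last_end = end
--     result.append(text[last_end:])
--
--     return "".join(result)
-- ===== SOURCE B (Python) =====
-- from typing import List
--
-- def highlight_overlapping_no_regex_alt2(keywords: List[str], text: str) -> str:
--     """
--     Coverage-bitmap implementation: mark every character covered by some
--     keyword occurrence, then wrap each maximal covered run in <b>...</b>.
--     """
--     n = len(text)
--     kws = [k for k in keywords if k]
--     covered = [False] * n
--     for i in range(n):
--         for k in kws:
--             if text.startswith(k, i):
--                 for j in range(i, i + len(k)):
--                     covered[j] = True
--     parts = []
--     last = 0
--     i = 0
--     while i < n:
--         if covered[i]: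
--             j = i + 1
--             while j < n and covered[j]:
--                 j += 1
--             parts.append(text[last:i])
--             parts.append("<b>" + text[i:j] + "</b>")
--             last = j
--             i = j
--         else:
--             i += 1
--     parts.append(text[last:])
--     return "".join(parts)
-- ===== Notes on version B (the rewrite author's own statement) =====
-- stated objective: alternative
-- what changed: A finds all occurrences per keyword with repeated str.find, sorts the match list and merges overlapping spans; B instead marks a boolean coverage bitmap over the text (one startswith test per position and keyword) and emits each maximal covered run directly, with no match list, no sort and no merge step.
import Mathlib
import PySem

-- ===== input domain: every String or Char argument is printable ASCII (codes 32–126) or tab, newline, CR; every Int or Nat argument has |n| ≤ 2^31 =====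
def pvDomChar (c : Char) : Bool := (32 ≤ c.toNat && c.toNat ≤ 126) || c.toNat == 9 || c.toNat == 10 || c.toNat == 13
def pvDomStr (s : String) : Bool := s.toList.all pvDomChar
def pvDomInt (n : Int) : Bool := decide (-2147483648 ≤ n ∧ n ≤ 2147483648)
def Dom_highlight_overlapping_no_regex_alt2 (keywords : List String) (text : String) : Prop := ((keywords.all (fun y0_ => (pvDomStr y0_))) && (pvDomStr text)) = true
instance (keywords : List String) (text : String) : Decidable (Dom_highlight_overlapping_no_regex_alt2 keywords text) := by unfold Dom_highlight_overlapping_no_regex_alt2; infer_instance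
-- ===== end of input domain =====

-- B replaces A's find-all-mtchs / sort / merge-overlaps pipeline by a coverage
-- bitmap over the text plus a scan for maximal covered runs (objective: alternative).

-- ===== PORT A =====
-- body of A's merge loop: extend Python's merged[-1] (the accumulator is kept
-- head-reversed, so merged[-1] is the head)
def pvStep (m : List (Int × Int × List Char)) (x : Int × Int × List Char) :
    List (Int × Int × List Char) :=
  match m with
  | [] => [x]  -- unreachable: the accumulator starts nonempty
  | last :: tl =>
    if x.1 ≤ last.2.1 then (last.1, max last.2.1 x.2.1, last.2.2) :: tl
    else x :: last :: tl

-- inner 'while pos < len(text)' loop of A: all occurrences of one keyword from pos on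
def pvOccLoop (cs kw : List Char) (pos : Nat) (acc : List (Int × Int × List Char)) :
    List (Int × Int × List Char) :=
  if h : pos < cs.length then
    let f := PySem.Chars.findFrom cs kw (pos : Int)
    if hf : f = -1 then acc
    else pvOccLoop cs kw (f.toNat + 1) (acc ++ [(f, f + kw.length, kw)])
  else acc
termination_by cs.length - pos
decreasing_by
  have := (PySem.Chars.findFrom_natCast_spec cs kw pos (le_of_lt h) hf).1
  omega

def highlight_overlapping_no_regex_alt2 (keywords : List String) (text : String) : String :=
  let cs := text.toList
  if cs = [] then "" else
  let valid := keywords.filter (fun kw => !(kw == ""))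
  if valid = [] then text else
  let mtchs := valid.foldl (fun acc kw => pvOccLoop cs kw.toList 0 acc) []
  if mtchs = [] then text else
  match PySem.List.sorted mtchs (fun x => x.1) false with
  | [] => text   -- unreachable: sorted of the nonempty 'mtchs' is nonempty
  | m0 :: rest =>
    let mergedRev := rest.foldl pvStep [m0]
    let st := mergedRev.reverse.foldl (fun (st : List (List Char) × Int) x =>
      (st.1 ++ [PySem.Chars.slice cs (some st.2) (some x.1)]
            ++ [('<' :: 'b' :: '>' :: PySem.Chars.slice cs (some x.1) (some x.2.1)) ++ ['<', '/', 'b', '>']],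
       x.2.1)) ([], 0)
    String.ofList (PySem.Chars.join [] (st.1 ++ [PySem.Chars.slice cs (some st.2) none]))

-- ===== PORT B =====
-- coverage bitmap: covered[j] = True for every j inside a keyword occurrence
-- (text.startswith(k, i) with 0 ≤ i ported exactly as startswith on cs.drop i)
def pvMark (cs : List Char) (kws : List (List Char)) : List Bool :=
  (List.range cs.length).foldl (fun cov i =>
    kws.foldl (fun cov k =>
      if PySem.Chars.startswith (cs.drop i) k then
        (List.range k.length).foldl
          (fun cov j => PySem.List.pySetD cov ((i + j : Nat) : Int) true) cov
      else cov) cov)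
    (List.replicate cs.length false)

-- inner 'while j < n and covered[j]' loop of B
def pvRunEnd (cov : List Bool) (j : Nat) : Nat :=
  if j < cov.length ∧ cov.getD j false = true then pvRunEnd cov (j + 1) else j
termination_by cov.length - j
decreasing_by omega

-- termination helper for pvScan (cited by its decreasing_by)
theorem pvRunEnd_ge (cov : List Bool) (j : Nat) : j ≤ pvRunEnd cov j := by
  fun_induction pvRunEnd cov j with
  | case1 j h ih => omega
  | case2 j h => omega

-- outer 'while i < n' loop of B, collecting the maximal covered runs
def pvScan (cov : List Bool) (i : Nat) : List (Nat × Nat) :=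
  if h : i < cov.length then
    if cov.getD i false = true then
      (i, pvRunEnd cov (i + 1)) :: pvScan cov (pvRunEnd cov (i + 1))
    else pvScan cov (i + 1)
  else []
termination_by cov.length - i
decreasing_by
  · have := pvRunEnd_ge cov (i + 1); omega
  · omega

def highlight_overlapping_no_regex_alt2_alt (keywords : List String) (text : String) : String :=
  let cs := text.toList
  let kws := (keywords.filter (fun kw => !(kw == ""))).map String.toList
  let spans := pvScan (pvMark cs kws) 0
  let st := spans.foldl (fun (st : List (List Char) × Int) x =>
    (st.1 ++ [PySem.Chars.slice cs (some st.2) (some (x.1 : Int))]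
          ++ [('<' :: 'b' :: '>' :: PySem.Chars.slice cs (some (x.1 : Int)) (some (x.2 : Int))) ++ ['<', '/', 'b', '>']],
     (x.2 : Int))) ([], 0)
  String.ofList (PySem.Chars.join [] (st.1 ++ [PySem.Chars.slice cs (some st.2) none]))

-- ===== PRECONDITION & SPEC =====
def Spec_highlight_overlapping_no_regex_alt2 (keywords : List String) (text : String) (out : String) : Prop := out = highlight_overlapping_no_regex_alt2_alt keywords text
instance (keywords : List String) (text : String) (out : String) : Decidable (Spec_highlight_overlapping_no_regex_alt2 keywords text out) := by unfold Spec_highlight_overlapping_no_regex_alt2; infer_instance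

-- ===== CLAIM (what is proved, stated in full; the proofs are below) =====
def Claim_equal_highlight_overlapping_no_regex_alt2 : Prop := ∀ (keywords : List String) (text : String), Dom_highlight_overlapping_no_regex_alt2 keywords text → Spec_highlight_overlapping_no_regex_alt2 keywords text (highlight_overlapping_no_regex_alt2 keywords text)


-- ===== LEMMAS AND PROOFS =====

theorem pvRunEnd_le (cov : List Bool) (j : Nat) (h : j ≤ cov.length) :
    pvRunEnd cov j ≤ cov.length := by
  fun_induction pvRunEnd cov j with
  | case1 j h' ih => exact ih (by omega)
  | case2 j h' => exact h

theorem pvRunEnd_covered (cov : List Bool) (j : Nat) :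
    ∀ p, j ≤ p → p < pvRunEnd cov j → cov.getD p false = true := by
  fun_induction pvRunEnd cov j with
  | case1 j h' ih =>
    intro p h1 h2
    rcases Nat.eq_or_lt_of_le h1 with rfl | h1
    · exact h'.2
    · exact ih p h1 h2
  | case2 j h' => intro p h1 h2; omega

theorem pvRunEnd_false (cov : List Bool) (j : Nat) :
    cov.getD (pvRunEnd cov j) false = false := by
  fun_induction pvRunEnd cov j with
  | case1 j h' ih => exact ih
  | case2 j h' =>
    by_cases hl : j < cov.length
    · simp only [hl, true_and] at h'; simpa using h'
    · exact List.getD_eq_default cov false (by omega)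

theorem pv_getD_set (l : List Bool) (n p : Nat) (v : Bool) :
    (l.set n v).getD p false = if p = n ∧ n < l.length then v else l.getD p false := by
  simp only [List.getD_eq_getElem?_getD, List.getElem?_set]
  by_cases h1 : n = p
  · subst h1
    by_cases h2 : n < l.length
    · simp [h2]
    · simp [h2]
  · have hne : ¬(p = n ∧ n < l.length) := fun h => h1 h.1.symm
    simp [h1, hne]

theorem pvScan_nil (cov : List Bool) : ∀ i : Nat,
    (∀ j : Nat, i ≤ j → cov.getD j false = false) → pvScan cov i = [] := by
  intro i
  fun_induction pvScan cov i with
  | case1 i h hc ih => intro hall; rw [hall i (le_refl i)] at hc; exact absurd hc (by simp)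
  | case2 i h hc ih => intro hall; exact ih (fun j hj => hall j (by omega))
  | case3 i h => intro _; rfl

theorem pvScan_good (cov : List Bool) : ∀ i : Nat,
    (pvScan cov i).Pairwise (fun a b => a.2 < b.1) ∧
    (∀ x ∈ pvScan cov i, i ≤ x.1 ∧ x.1 < x.2 ∧ x.2 ≤ cov.length) ∧
    (∀ p : Nat, i ≤ p → (cov.getD p false = true ↔ ∃ x ∈ pvScan cov i, x.1 ≤ p ∧ p < x.2)) := by
  intro i
  fun_induction pvScan cov i with
  | case1 i h hc ih =>
    set E := pvRunEnd cov (i + 1) with hE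
    obtain ⟨ihP, ihB, ihC⟩ := ih
    have hEgt : i < E := by have := pvRunEnd_ge cov (i+1); omega
    have hEle : E ≤ cov.length := pvRunEnd_le cov (i+1) (by omega)
    have hEfalse : cov.getD E false = false := pvRunEnd_false cov (i+1)
    have htail_gt : ∀ x ∈ pvScan cov E, E < x.1 := by
      intro x hx
      have hb := ihB x hx
      rcases Nat.eq_or_lt_of_le hb.1 with heq | hlt
      · exfalso
        have : cov.getD x.1 false = true := by
          rw [ihC x.1 hb.1]; exact ⟨x, hx, le_refl _, hb.2.1⟩
        rw [← heq] at this; rw [this] at hEfalse; exact absurd hEfalse (by simp)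
      · exact hlt
    refine ⟨?_, ?_, ?_⟩
    · exact List.Pairwise.cons (fun x hx => htail_gt x hx) ihP
    · intro x hx
      rcases List.mem_cons.mp hx with rfl | hx
      · exact ⟨le_refl _, hEgt, hEle⟩
      · have := ihB x hx; omega
    · intro p hp
      by_cases hpe : p < E
      · constructor
        · intro _; exact ⟨(i, E), List.mem_cons_self, le_of_eq rfl |>.trans hp, hpe⟩
        · intro _
          rcases Nat.eq_or_lt_of_le hp with heq | hlt
          · rw [← heq]; exact hc
          · exact pvRunEnd_covered cov (i+1) p (by omega) hpe
      · have hpE : E ≤ p := by omega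
        rw [ihC p hpE]
        constructor
        · intro ⟨x, hx, hx1, hx2⟩; exact ⟨x, List.mem_cons_of_mem _ hx, hx1, hx2⟩
        · intro ⟨x, hx, hx1, hx2⟩
          rcases List.mem_cons.mp hx with rfl | hx
          · omega
          · exact ⟨x, hx, hx1, hx2⟩
  | case2 i h hc ih =>
    obtain ⟨ihP, ihB, ihC⟩ := ih
    refine ⟨ihP, ?_, ?_⟩
    · intro x hx; have := ihB x hx; omega
    · intro p hp
      rcases Nat.eq_or_lt_of_le hp with heq | hlt
      · subst heq
        simp only [Bool.not_eq_true] at hc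
        rw [hc]
        constructor
        · intro hfalse; exact absurd hfalse (by simp)
        · intro ⟨x, hx, hx1, hx2⟩; have := ihB x hx; omega
      · exact ihC p hlt
  | case3 i h =>
    refine ⟨List.Pairwise.nil, by simp, ?_⟩
    intro p hp
    rw [List.getD_eq_default cov false (by omega)]
    simp

def pvCovBy (l : List (Int × Int)) (p : Int) : Prop := ∃ x ∈ l, x.1 ≤ p ∧ p < x.2

def pvGood (n : Int) (cov : Int → Prop) (out : List (Int × Int)) : Prop :=
  out.Pairwise (fun a b => a.2 < b.1) ∧
  (∀ x ∈ out, 0 ≤ x.1 ∧ x.1 < x.2 ∧ x.2 ≤ n) ∧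
  (∀ p, cov p ↔ pvCovBy out p)

theorem pvGood_cov_head {n : Int} {cov : Int → Prop} {a : Int × Int} {t : List (Int × Int)}
    (h : pvGood n cov (a :: t)) : cov a.1 :=
  (h.2.2 a.1).mpr ⟨a, List.mem_cons_self, le_refl _, (h.2.1 a List.mem_cons_self).2.1⟩

theorem pvGood_min {n : Int} {cov : Int → Prop} {a : Int × Int} {t : List (Int × Int)}
    (h : pvGood n cov (a :: t)) : ∀ p, cov p → a.1 ≤ p := by
  intro p hp
  obtain ⟨x, hx, h1, h2⟩ := (h.2.2 p).mp hp
  rcases List.mem_cons.mp hx with rfl | hx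
  · exact h1
  · have := List.rel_of_pairwise_cons h.1 hx
    have := (h.2.1 a List.mem_cons_self).2.1
    omega

theorem pvGood_not_cov_end {n : Int} {cov : Int → Prop} {a : Int × Int} {t : List (Int × Int)}
    (h : pvGood n cov (a :: t)) : ¬ cov a.2 := by
  intro hp
  obtain ⟨x, hx, h1, h2⟩ := (h.2.2 a.2).mp hp
  rcases List.mem_cons.mp hx with rfl | hx
  · omega
  · have := List.rel_of_pairwise_cons h.1 hx
    omega

theorem pvGood_cov_mem {n : Int} {cov : Int → Prop} {a : Int × Int} {t : List (Int × Int)}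
    (h : pvGood n cov (a :: t)) : ∀ p, a.1 ≤ p → p < a.2 → cov p :=
  fun p h1 h2 => (h.2.2 p).mpr ⟨a, List.mem_cons_self, h1, h2⟩

theorem pvGood_tail {n : Int} {cov : Int → Prop} {a : Int × Int} {t : List (Int × Int)}
    (h : pvGood n cov (a :: t)) : pvGood n (fun p => cov p ∧ a.2 < p) t := by
  refine ⟨List.Pairwise.sublist (List.sublist_cons_self a t) h.1,
          fun x hx => h.2.1 x (List.mem_cons_of_mem _ hx), ?_⟩
  intro p
  constructor
  · intro ⟨hp, hgt⟩
    obtain ⟨x, hx, h1, h2⟩ := (h.2.2 p).mp hp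
    rcases List.mem_cons.mp hx with rfl | hx
    · omega
    · exact ⟨x, hx, h1, h2⟩
  · intro ⟨x, hx, h1, h2⟩
    refine ⟨(h.2.2 p).mpr ⟨x, List.mem_cons_of_mem _ hx, h1, h2⟩, ?_⟩
    have := List.rel_of_pairwise_cons h.1 hx
    omega

theorem pvGood_unique (n : Int) : ∀ (out1 out2 : List (Int × Int)) (cov : Int → Prop),
    pvGood n cov out1 → pvGood n cov out2 → out1 = out2 := by
  intro out1
  induction out1 with
  | nil =>
    intro out2 cov h1 h2
    cases out2 with
    | nil => rfl
    | cons b t2 =>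
      exfalso
      obtain ⟨x, hx, -, -⟩ := (h1.2.2 b.1).mp (pvGood_cov_head h2)
      exact absurd hx (List.not_mem_nil)
  | cons a t1 ih =>
    intro out2 cov h1 h2
    cases out2 with
    | nil =>
      exfalso
      obtain ⟨x, hx, -, -⟩ := (h2.2.2 a.1).mp (pvGood_cov_head h1)
      exact absurd hx (List.not_mem_nil)
    | cons b t2 =>
      have h11 : a.1 = b.1 :=
        le_antisymm (pvGood_min h1 b.1 (pvGood_cov_head h2)) (pvGood_min h2 a.1 (pvGood_cov_head h1))
      have hb1 : b.1 < b.2 := (h2.2.1 b List.mem_cons_self).2.1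
      have ha1 : a.1 < a.2 := (h1.2.1 a List.mem_cons_self).2.1
      have h22 : a.2 = b.2 := by
        by_contra hne
        rcases lt_or_gt_of_ne hne with hlt | hgt
        · exact pvGood_not_cov_end h1 (pvGood_cov_mem h2 a.2 (by omega) hlt)
        · exact pvGood_not_cov_end h2 (pvGood_cov_mem h1 b.2 (by omega) hgt)
      have hab : a = b := Prod.ext h11 h22
      subst hab
      have := ih t2 (fun p => cov p ∧ a.2 < p) (pvGood_tail h1) (pvGood_tail h2)
      rw [this]

theorem pvInner_length (i : Nat) : ∀ (m : Nat) (cov : List Bool),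
    ((List.range m).foldl (fun cov j => PySem.List.pySetD cov ((i + j : Nat) : Int) true) cov).length
      = cov.length := by
  intro m
  induction m with
  | zero => intro cov; rfl
  | succ m ihm =>
    intro cov
    rw [List.range_succ, List.foldl_append, List.foldl_cons, List.foldl_nil,
        PySem.List.pySetD_natCast, List.length_set, ihm]

theorem pvInner_getD (i p : Nat) : ∀ (m : Nat) (cov : List Bool), i + m ≤ cov.length →
    (((List.range m).foldl (fun cov j => PySem.List.pySetD cov ((i + j : Nat) : Int) true) cov).getD p false = true
      ↔ cov.getD p false = true ∨ (i ≤ p ∧ p < i + m)) := by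
  intro m
  induction m with
  | zero => intro cov h; simp
  | succ m ihm =>
    intro cov h
    rw [List.range_succ, List.foldl_append, List.foldl_cons, List.foldl_nil,
        PySem.List.pySetD_natCast, pv_getD_set, pvInner_length]
    by_cases hp : p = i + m
    · rw [if_pos ⟨hp, by omega⟩]
      constructor
      · intro _; exact Or.inr (by omega)
      · intro _; rfl
    · rw [if_neg (by tauto), ihm cov (by omega)]
      constructor
      · rintro (h1 | h2)
        · exact Or.inl h1
        · exact Or.inr ⟨h2.1, by omega⟩
      · rintro (h1 | h2)
        · exact Or.inl h1
        · exact Or.inr ⟨h2.1, by omega⟩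

theorem pvMid_length (cs : List Char) (i : Nat) : ∀ (ks : List (List Char)) (cov : List Bool),
    (ks.foldl (fun cov k =>
      if PySem.Chars.startswith (cs.drop i) k then
        (List.range k.length).foldl
          (fun cov j => PySem.List.pySetD cov ((i + j : Nat) : Int) true) cov
      else cov) cov).length = cov.length := by
  intro ks
  induction ks with
  | nil => intro cov; rfl
  | cons k ks ihk =>
    intro cov
    rw [List.foldl_cons, ihk]
    by_cases hs : PySem.Chars.startswith (cs.drop i) k
    · rw [if_pos hs, pvInner_length]
    · rw [if_neg hs]

theorem pvMid_getD (cs : List Char) (i p : Nat) (hi : i < cs.length) :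
    ∀ (ks : List (List Char)) (cov : List Bool), cov.length = cs.length →
    ((ks.foldl (fun cov k =>
      if PySem.Chars.startswith (cs.drop i) k then
        (List.range k.length).foldl
          (fun cov j => PySem.List.pySetD cov ((i + j : Nat) : Int) true) cov
      else cov) cov).getD p false = true
      ↔ cov.getD p false = true ∨
        ∃ k ∈ ks, PySem.Chars.startswith (cs.drop i) k = true ∧ i ≤ p ∧ p < i + k.length) := by
  intro ks
  induction ks with
  | nil => intro cov hlen; simp
  | cons k ks ihk =>
    intro cov hlen
    rw [List.foldl_cons]
    by_cases hs : PySem.Chars.startswith (cs.drop i) k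
    · have hpre : k <+: cs.drop i := (PySem.Chars.startswith_iff _ _).mp hs
      have hklen : i + k.length ≤ cs.length := by
        have := hpre.length_le
        rw [List.length_drop] at this
        omega
      rw [if_pos hs, ihk _ (by rw [pvInner_length, hlen]),
          pvInner_getD i p k.length cov (by omega)]
      constructor
      · rintro ((h1 | h2) | h3)
        · exact Or.inl h1
        · exact Or.inr ⟨k, List.mem_cons_self, hs, h2⟩
        · obtain ⟨k', hk', hrest⟩ := h3
          exact Or.inr ⟨k', List.mem_cons_of_mem _ hk', hrest⟩
      · rintro (h1 | ⟨k', hk', hsw, hb⟩)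
        · exact Or.inl (Or.inl h1)
        · rcases List.mem_cons.mp hk' with rfl | hk'
          · exact Or.inl (Or.inr hb)
          · exact Or.inr ⟨k', hk', hsw, hb⟩
    · rw [if_neg hs, ihk _ hlen]
      constructor
      · rintro (h1 | h2)
        · exact Or.inl h1
        · obtain ⟨k', hk', hrest⟩ := h2
          exact Or.inr ⟨k', List.mem_cons_of_mem _ hk', hrest⟩
      · rintro (h1 | ⟨k', hk', hsw, hb⟩)
        · exact Or.inl h1
        · rcases List.mem_cons.mp hk' with rfl | hk'
          · exact absurd hsw hs
          · exact Or.inr ⟨k', hk', hsw, hb⟩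

theorem pvOuter_length (cs : List Char) (kws : List (List Char)) : ∀ (m : Nat),
    ((List.range m).foldl (fun cov i =>
      kws.foldl (fun cov k =>
        if PySem.Chars.startswith (cs.drop i) k then
          (List.range k.length).foldl
            (fun cov j => PySem.List.pySetD cov ((i + j : Nat) : Int) true) cov
        else cov) cov) (List.replicate cs.length false)).length = cs.length := by
  intro m
  induction m with
  | zero => simp
  | succ m ihm =>
    rw [List.range_succ, List.foldl_append, List.foldl_cons, List.foldl_nil, pvMid_length, ihm]

theorem pvMark_length (cs : List Char) (kws : List (List Char)) :
    (pvMark cs kws).length = cs.length := pvOuter_length cs kws cs.length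

theorem pvOuter_getD (cs : List Char) (kws : List (List Char)) (p : Nat) :
    ∀ (m : Nat), m ≤ cs.length →
    (((List.range m).foldl (fun cov i =>
      kws.foldl (fun cov k =>
        if PySem.Chars.startswith (cs.drop i) k then
          (List.range k.length).foldl
            (fun cov j => PySem.List.pySetD cov ((i + j : Nat) : Int) true) cov
        else cov) cov) (List.replicate cs.length false)).getD p false = true
      ↔ ∃ i : Nat, i < m ∧ ∃ k ∈ kws, PySem.Chars.startswith (cs.drop i) k = true ∧
          i ≤ p ∧ p < i + k.length) := by
  intro m
  induction m with
  | zero => simp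
  | succ m ihm =>
    intro hm
    rw [List.range_succ, List.foldl_append, List.foldl_cons, List.foldl_nil,
        pvMid_getD cs m p (by omega) kws _ (pvOuter_length cs kws m), ihm (by omega)]
    constructor
    · rintro (⟨i, hi, rest⟩ | ⟨k, hk, rest⟩)
      · exact ⟨i, by omega, rest⟩
      · exact ⟨m, by omega, k, hk, rest⟩
    · rintro ⟨i, hi, k, hk, hsw, hb⟩
      by_cases him : i = m
      · subst him; exact Or.inr ⟨k, hk, hsw, hb⟩
      · exact Or.inl ⟨i, by omega, k, hk, hsw, hb⟩

theorem pvMark_getD (cs : List Char) (kws : List (List Char)) (p : Nat) :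
    (pvMark cs kws).getD p false = true ↔
      ∃ i : Nat, i < cs.length ∧ ∃ k ∈ kws, PySem.Chars.startswith (cs.drop i) k = true ∧
        i ≤ p ∧ p < i + k.length :=
  pvOuter_getD cs kws p cs.length (le_refl _)

def pvCovP (kws : List (List Char)) (cs : List Char) (p : Int) : Prop :=
  ∃ k ∈ kws, ∃ i : Nat, k <+: cs.drop i ∧ (i : Int) ≤ p ∧ p < (i : Int) + k.length

theorem pvB_good (cs : List Char) (kws : List (List Char)) (hk : ∀ k ∈ kws, k ≠ []) :
    pvGood (cs.length : Int) (pvCovP kws cs)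
      ((pvScan (pvMark cs kws) 0).map (fun x => ((x.1 : Int), (x.2 : Int)))) := by
  obtain ⟨P, B, C⟩ := pvScan_good (pvMark cs kws) 0
  have hlen := pvMark_length cs kws
  refine ⟨?_, ?_, ?_⟩
  · refine List.Pairwise.map _ (fun a b h => ?_) P
    simpa using h
  · rintro x hx
    obtain ⟨y, hy, rfl⟩ := List.mem_map.mp hx
    have h1 := B y hy
    have h2 : y.2 ≤ cs.length := by omega
    refine ⟨by positivity, by simpa using h1.2.1, by simpa using h2⟩
  · intro p
    constructor
    · rintro ⟨k, hkmem, i, hpre, hip, hpk⟩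
      have hp0 : (0 : Int) ≤ p := le_trans (by positivity) hip
      set q := p.toNat with hq
      have hpq : p = (q : Int) := (Int.toNat_of_nonneg hp0).symm
      have hiq : i ≤ q := by omega
      have hqk : q < i + k.length := by omega
      have hilt : i < cs.length := by
        by_contra hge
        rw [List.drop_eq_nil_of_le (by omega)] at hpre
        exact hk k hkmem (List.prefix_nil.mp hpre)
      have hcov : (pvMark cs kws).getD q false = true :=
        (pvMark_getD cs kws q).mpr ⟨i, hilt, k, hkmem, (PySem.Chars.startswith_iff _ _).mpr hpre, hiq, hqk⟩
      obtain ⟨x, hx, h1, h2⟩ := (C q (Nat.zero_le q)).mp hcov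
      exact ⟨((x.1 : Int), (x.2 : Int)), List.mem_map_of_mem hx, by omega, by omega⟩
    · rintro ⟨x, hx, h1, h2⟩
      obtain ⟨y, hy, rfl⟩ := List.mem_map.mp hx
      have hp0 : (0 : Int) ≤ p := le_trans (by positivity) h1
      set q := p.toNat with hq
      have hcov : (pvMark cs kws).getD q false = true :=
        (C q (Nat.zero_le q)).mpr ⟨y, hy, by omega, by omega⟩
      obtain ⟨i, hilt, k, hkmem, hsw, hiq, hqk⟩ := (pvMark_getD cs kws q).mp hcov
      exact ⟨k, hkmem, i, (PySem.Chars.startswith_iff _ _).mp hsw, by omega, by omega⟩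

theorem pvOccLoop_mem (cs kw : List Char) (hkw : kw ≠ []) : ∀ (pos : Nat) (acc : List (Int × Int × List Char)) (x : Int × Int × List Char),
    x ∈ pvOccLoop cs kw pos acc ↔
      x ∈ acc ∨ ∃ i : Nat, pos ≤ i ∧ kw <+: cs.drop i ∧ x = ((i : Int), (i : Int) + kw.length, kw) := by
  intro pos acc x
  fun_induction pvOccLoop cs kw pos acc generalizing x with
  | case1 pos acc h f hf =>
    have hni := (PySem.Chars.findFrom_natCast_eq_neg_one_iff cs kw pos (le_of_lt h)).mp hf
    constructor
    · exact Or.inl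
    · rintro (hx | ⟨i, hpi, hpre, rfl⟩)
      · exact hx
      · exfalso
        apply hni
        have hdd : (cs.drop pos).drop (i - pos) = cs.drop i := by
          rw [List.drop_drop]; congr 1; omega
        rw [← hdd] at hpre
        exact List.IsInfix.trans hpre.isInfix (List.drop_suffix _ _).isInfix
  | case2 pos acc h f hf ih =>
    obtain ⟨hge, hpre, hmin⟩ := PySem.Chars.findFrom_natCast_spec cs kw pos (le_of_lt h) hf
    have hf0 : (0 : Int) ≤ f := le_trans (by positivity) hge
    have hfn : f = ((f.toNat : Nat) : Int) := (Int.toNat_of_nonneg hf0).symm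
    have hposf : pos ≤ f.toNat := by omega
    rw [ih x, List.mem_append, List.mem_singleton]
    constructor
    · rintro ((hx | rfl) | ⟨i, hpi, hp2, rfl⟩)
      · exact Or.inl hx
      · exact Or.inr ⟨f.toNat, hposf, hpre, by rw [← hfn]⟩
      · exact Or.inr ⟨i, by omega, hp2, rfl⟩
    · rintro (hx | ⟨i, hpi, hp2, rfl⟩)
      · exact Or.inl (Or.inl hx)
      · rcases lt_trichotomy i f.toNat with hlt | heq | hgt
        · exact absurd hp2 (hmin i hpi hlt)
        · subst heq; exact Or.inl (Or.inr (by rw [hfn]; simp))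
        · exact Or.inr ⟨i, by omega, hp2, rfl⟩
  | case3 pos acc h =>
    constructor
    · exact Or.inl
    · rintro (hx | ⟨i, hpi, hpre, rfl⟩)
      · exact hx
      · exfalso
        rw [List.drop_eq_nil_of_le (by omega)] at hpre
        exact hkw (List.prefix_nil.mp hpre)

theorem pvMtchs_mem (cs : List Char) : ∀ (valid : List String), (∀ kw ∈ valid, kw ≠ "") →
    ∀ (acc : List (Int × Int × List Char)) (x : Int × Int × List Char),
    (x ∈ valid.foldl (fun acc kw => pvOccLoop cs kw.toList 0 acc) acc ↔
      x ∈ acc ∨ ∃ kw ∈ valid, ∃ i : Nat, kw.toList <+: cs.drop i ∧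
        x = ((i : Int), (i : Int) + kw.toList.length, kw.toList)) := by
  intro valid
  induction valid with
  | nil => intro _ acc x; simp
  | cons kw valid ihv =>
    intro hv acc x
    rw [List.foldl_cons, ihv (fun k hk => hv k (List.mem_cons_of_mem _ hk)),
        pvOccLoop_mem cs kw.toList (by simp [hv kw List.mem_cons_self]) 0 acc x]
    constructor
    · rintro ((hx | ⟨i, -, hpre, rfl⟩) | ⟨k, hk, i, hpre, rfl⟩)
      · exact Or.inl hx
      · exact Or.inr ⟨kw, List.mem_cons_self, i, hpre, rfl⟩
      · exact Or.inr ⟨k, List.mem_cons_of_mem _ hk, i, hpre, rfl⟩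
    · rintro (hx | ⟨k, hk, i, hpre, rfl⟩)
      · exact Or.inl (Or.inl hx)
      · rcases List.mem_cons.mp hk with rfl | hk
        · exact Or.inl (Or.inr ⟨i, Nat.zero_le i, hpre, rfl⟩)
        · exact Or.inr ⟨k, hk, i, hpre, rfl⟩

def pvProj (x : Int × Int × List Char) : Int × Int := (x.1, x.2.1)

theorem pvCovBy_map (l : List (Int × Int × List Char)) (p : Int) :
    pvCovBy (l.map pvProj) p ↔ ∃ y ∈ l, y.1 ≤ p ∧ p < y.2.1 := by
  constructor
  · rintro ⟨x, hx, h1, h2⟩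
    obtain ⟨y, hy, rfl⟩ := List.mem_map.mp hx
    exact ⟨y, hy, h1, h2⟩
  · rintro ⟨y, hy, h1, h2⟩
    exact ⟨pvProj y, List.mem_map_of_mem hy, h1, h2⟩

theorem pvMergeFold_good (n : Int) :
    ∀ (rest : List (Int × Int × List Char)) (a : Int × Int × List Char) (tl : List (Int × Int × List Char)),
    ((a :: tl).reverse).Pairwise (fun u v => u.2.1 < v.1) →
    (∀ x ∈ a :: tl, 0 ≤ x.1 ∧ x.1 < x.2.1 ∧ x.2.1 ≤ n) →
    (∀ x ∈ rest, 0 ≤ x.1 ∧ x.1 < x.2.1 ∧ x.2.1 ≤ n) →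
    (∀ x ∈ rest, a.1 ≤ x.1) →
    rest.Pairwise (fun u v => u.1 ≤ v.1) →
    ((rest.foldl pvStep (a :: tl)).reverse).Pairwise (fun u v => u.2.1 < v.1) ∧
    (∀ x ∈ rest.foldl pvStep (a :: tl), 0 ≤ x.1 ∧ x.1 < x.2.1 ∧ x.2.1 ≤ n) ∧
    (∀ p : Int, pvCovBy ((rest.foldl pvStep (a :: tl)).map pvProj) p ↔
      pvCovBy ((a :: tl).map pvProj) p ∨ pvCovBy (rest.map pvProj) p) := by
  intro rest
  induction rest with
  | nil =>
    intro a tl h1 h2 h3 h4 h5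
    refine ⟨h1, h2, fun p => ?_⟩
    simp [pvCovBy]
  | cons x rest ih =>
    intro a tl h1 h2 h3 h4 h5
    rw [List.foldl_cons]
    show _ ∧ (∀ y ∈ List.foldl pvStep (pvStep (a :: tl) x) rest, 0 ≤ y.1 ∧ y.1 < y.2.1 ∧ y.2.1 ≤ n) ∧ _
    have hx := h3 x List.mem_cons_self
    have ha := h2 a List.mem_cons_self
    have hax : a.1 ≤ x.1 := h4 x List.mem_cons_self
    rw [List.reverse_cons, List.pairwise_append] at h1
    obtain ⟨htlP, -, htla⟩ := h1
    by_cases hxa : x.1 ≤ a.2.1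
    · rw [show pvStep (a :: tl) x = (a.1, max a.2.1 x.2.1, a.2.2) :: tl by
        simp only [pvStep]; rw [if_pos hxa]]
      have ih' := ih (a.1, max a.2.1 x.2.1, a.2.2) tl ?_ ?_
        (fun y hy => h3 y (List.mem_cons_of_mem _ hy))
        (fun y hy => h4 y (List.mem_cons_of_mem _ hy))
        (List.Pairwise.sublist (List.sublist_cons_self _ _) h5)
      · obtain ⟨C1, C2, C3⟩ := ih'
        refine ⟨C1, C2, fun p => ?_⟩
        rw [C3 p]
        simp only [pvCovBy_map]
        constructor
        · rintro (⟨y, hy, hy1, hy2⟩ | hrest)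
          · rcases List.mem_cons.mp hy with rfl | hy
            · by_cases hpa : p < a.2.1
              · exact Or.inl ⟨a, List.mem_cons_self, hy1, hpa⟩
              · refine Or.inr ⟨x, List.mem_cons_self, by omega, by simp at hy2; omega⟩
            · exact Or.inl ⟨y, List.mem_cons_of_mem _ hy, hy1, hy2⟩
          · obtain ⟨y, hy, hys⟩ := hrest
            exact Or.inr ⟨y, List.mem_cons_of_mem _ hy, hys⟩
        · rintro (⟨y, hy, hy1, hy2⟩ | ⟨y, hy, hy1, hy2⟩)
          · rcases List.mem_cons.mp hy with rfl | hy
            · exact Or.inl ⟨(y.1, max y.2.1 x.2.1, y.2.2), List.mem_cons_self, hy1, by simp; omega⟩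
            · exact Or.inl ⟨y, List.mem_cons_of_mem _ hy, hy1, hy2⟩
          · rcases List.mem_cons.mp hy with rfl | hy
            · exact Or.inl ⟨(a.1, max a.2.1 y.2.1, a.2.2), List.mem_cons_self, by omega, by simp; omega⟩
            · exact Or.inr ⟨y, hy, hy1, hy2⟩
      · rw [List.reverse_cons, List.pairwise_append]
        exact ⟨htlP, List.pairwise_singleton _ _, fun u hu v hv => by
          rw [List.mem_singleton] at hv; subst hv; exact htla u hu a (List.mem_singleton_self a)⟩
      · intro y hy
        rcases List.mem_cons.mp hy with rfl | hy
        · refine ⟨ha.1, by simp; omega, by simp; omega⟩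
        · exact h2 y (List.mem_cons_of_mem _ hy)
    · rw [show pvStep (a :: tl) x = x :: a :: tl by
        simp only [pvStep]; rw [if_neg hxa]]
      have ih' := ih x (a :: tl) ?_ ?_
        (fun y hy => h3 y (List.mem_cons_of_mem _ hy))
        (fun y hy => List.rel_of_pairwise_cons h5 hy)
        (List.Pairwise.sublist (List.sublist_cons_self _ _) h5)
      · obtain ⟨C1, C2, C3⟩ := ih'
        refine ⟨C1, C2, fun p => ?_⟩
        rw [C3 p]
        simp only [pvCovBy_map]
        constructor
        · rintro (⟨y, hy, hy1, hy2⟩ | hrest)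
          · rcases List.mem_cons.mp hy with rfl | hy
            · exact Or.inr ⟨y, List.mem_cons_self, hy1, hy2⟩
            · exact Or.inl ⟨y, hy, hy1, hy2⟩
          · obtain ⟨y, hy, hys⟩ := hrest
            exact Or.inr ⟨y, List.mem_cons_of_mem _ hy, hys⟩
        · rintro (⟨y, hy, hy1, hy2⟩ | ⟨y, hy, hy1, hy2⟩)
          · exact Or.inl ⟨y, List.mem_cons_of_mem _ hy, hy1, hy2⟩
          · rcases List.mem_cons.mp hy with rfl | hy
            · exact Or.inl ⟨y, List.mem_cons_self, hy1, hy2⟩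
            · exact Or.inr ⟨y, hy, hy1, hy2⟩
      · rw [List.reverse_cons, List.reverse_cons, List.append_assoc, List.pairwise_append]
        refine ⟨htlP, ?_, ?_⟩
        · rw [List.pairwise_append]
          refine ⟨List.pairwise_singleton _ _, List.pairwise_singleton _ _, ?_⟩
          intro u hu v hv
          rw [List.mem_singleton] at hu hv
          subst hu; subst hv
          omega
        · intro u hu v hv
          have hua := htla u hu a (List.mem_singleton_self a)
          rcases List.mem_append.mp hv with hv | hv <;> rw [List.mem_singleton] at hv <;> subst hv
          · exact hua
          · omega
      · intro y hy
        rcases List.mem_cons.mp hy with rfl | hy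
        · exact hx
        · exact h2 y hy

theorem pvRender_congr (cs : List Char) : ∀ (l1 : List (Int × Int × List Char)) (l2 : List (Nat × Nat))
    (st : List (List Char) × Int),
    l1.map pvProj = l2.map (fun x => ((x.1 : Int), (x.2 : Int))) →
    l1.foldl (fun (st : List (List Char) × Int) x =>
      (st.1 ++ [PySem.Chars.slice cs (some st.2) (some x.1)]
            ++ [('<' :: 'b' :: '>' :: PySem.Chars.slice cs (some x.1) (some x.2.1)) ++ ['<', '/', 'b', '>']],
       x.2.1)) st =
    l2.foldl (fun (st : List (List Char) × Int) x =>
      (st.1 ++ [PySem.Chars.slice cs (some st.2) (some (x.1 : Int))]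
            ++ [('<' :: 'b' :: '>' :: PySem.Chars.slice cs (some (x.1 : Int)) (some (x.2 : Int))) ++ ['<', '/', 'b', '>']],
       (x.2 : Int))) st := by
  intro l1
  induction l1 with
  | nil =>
    intro l2 st hmap
    rw [List.map_nil] at hmap
    rw [List.eq_nil_of_map_eq_nil hmap.symm, List.foldl_nil, List.foldl_nil]
  | cons x l1 ihl =>
    intro l2 st hmap
    cases l2 with
    | nil => simp at hmap
    | cons y l2 =>
      rw [List.map_cons, List.map_cons] at hmap
      have hh := List.head_eq_of_cons_eq hmap
      have ht := List.tail_eq_of_cons_eq hmap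
      have h1 : x.1 = (y.1 : Int) := congrArg Prod.fst hh
      have h2 : x.2.1 = (y.2 : Int) := congrArg Prod.snd hh
      rw [List.foldl_cons, List.foldl_cons, h1, h2]
      exact ihl l2 _ ht

theorem pvRender_nil (text : String) :
    String.ofList (PySem.Chars.join []
      (([] : List (List Char)) ++ [PySem.Chars.slice text.toList (some (0 : Int)) none])) = text := by
  rw [List.nil_append]
  have h0 : PySem.Chars.slice text.toList (some (0 : Int)) none = text.toList := by
    simp [PySem.Chars.slice_eq_listSlice]
  rw [h0, PySem.Chars.join_singleton, String.ofList_toList]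

-- A's merged spans and B's scanned spans are both the maximal runs of the same
-- coverage predicate, hence equal; the two render folds then agree literally.

theorem pvAlt_eq_text (keywords : List String) (text : String)
    (h : ∀ j : Nat, (pvMark text.toList
        ((keywords.filter (fun kw => !(kw == ""))).map String.toList)).getD j false = false) :
    highlight_overlapping_no_regex_alt2_alt keywords text = text := by
  unfold highlight_overlapping_no_regex_alt2_alt
  simp only []
  rw [pvScan_nil _ 0 (fun j _ => h j), List.foldl_nil]
  exact pvRender_nil text

theorem pv_main (keywords : List String) (text : String) :
    highlight_overlapping_no_regex_alt2 keywords text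
      = highlight_overlapping_no_regex_alt2_alt keywords text := by
  unfold highlight_overlapping_no_regex_alt2
  simp only []
  set cs := text.toList with hcs
  set valid := keywords.filter (fun kw => !(kw == "")) with hvalid
  set kws := valid.map String.toList with hkws
  have hv : ∀ kw ∈ valid, kw ≠ "" := by
    intro kw hkw
    have := (List.mem_filter.mp hkw).2
    simpa using this
  have hk : ∀ k ∈ kws, k ≠ [] := by
    intro k hkmem
    obtain ⟨kw, hkw, rfl⟩ := List.mem_map.mp hkmem
    simp [hv kw hkw]
  by_cases h0 : cs = []
  · -- empty text: A returns "", and text = ""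
    have hmark : ∀ j : Nat, (pvMark cs kws).getD j false = false := by
      intro j
      apply List.getD_eq_default
      rw [pvMark_length, h0]
      exact Nat.zero_le j
    have htext : text = "" := by
      have h := (String.ofList_toList : String.ofList text.toList = text).symm
      rw [← hcs, h0] at h
      exact h
    rw [if_pos h0, pvAlt_eq_text keywords text hmark, htext]
  · rw [if_neg h0]
    by_cases h1 : valid = []
    · -- no nonempty keyword: both sides return the text
      have hkws0 : kws = ([] : List (List Char)) := by rw [hkws, h1]; rfl
      have hmark : ∀ j : Nat, (pvMark cs kws).getD j false = false := by
        rw [hkws0]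
        have hrep : pvMark cs [] = List.replicate cs.length false := by
          unfold pvMark
          simp only [List.foldl_nil]
          exact PySem.List.foldl_ignore _ _
        rw [hrep]
        intro j
        simp [List.getD_eq_getElem?_getD]
      rw [if_pos h1, pvAlt_eq_text keywords text hmark]
    · rw [if_neg h1]
      set mtchs := valid.foldl (fun acc kw => pvOccLoop cs kw.toList 0 acc) [] with hmtchs
      have hchar : ∀ x, x ∈ mtchs ↔ ∃ kw ∈ valid, ∃ i : Nat, kw.toList <+: cs.drop i ∧
          x = ((i : Int), (i : Int) + kw.toList.length, kw.toList) := by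
        intro x
        have := pvMtchs_mem cs valid hv [] x
        simpa using this
      by_cases h2 : mtchs = []
      · -- no occurrence anywhere: both sides return the text
        have hnoocc : ∀ kw ∈ valid, ∀ i : Nat, ¬ kw.toList <+: cs.drop i := by
          intro kw hkw i hpre
          have : ((i : Int), (i : Int) + kw.toList.length, kw.toList) ∈ mtchs :=
            (hchar _).mpr ⟨kw, hkw, i, hpre, rfl⟩
          rw [h2] at this
          exact absurd this List.not_mem_nil
        have hmark : ∀ j : Nat, (pvMark cs kws).getD j false = false := by
          intro j
          cases hgd : (pvMark cs kws).getD j false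
          · rfl
          · exfalso
            obtain ⟨i, hi, k, hkmem, hsw, -, -⟩ := (pvMark_getD cs kws j).mp hgd
            obtain ⟨kw, hkw, rfl⟩ := List.mem_map.mp hkmem
            exact hnoocc kw hkw i ((PySem.Chars.startswith_iff _ _).mp hsw)
        rw [if_pos h2, pvAlt_eq_text keywords text hmark]
      · rw [if_neg h2]
        cases hsrt : PySem.List.sorted mtchs (fun x => x.1) false with
        | nil => exact absurd ((PySem.List.sorted_eq_nil_iff mtchs (fun x => x.1) false).mp hsrt) h2
        | cons m0 rest =>
          -- facts about the sorted match list
          have hperm := PySem.List.sorted_perm mtchs (fun x => x.1) false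
          rw [hsrt] at hperm
          have hbounds : ∀ x ∈ m0 :: rest, 0 ≤ x.1 ∧ x.1 < x.2.1 ∧ x.2.1 ≤ (cs.length : Int) := by
            intro x hx
            obtain ⟨kw, hkw, i, hpre, rfl⟩ := (hchar x).mp (hperm.mem_iff.mp hx)
            have hlen := hpre.length_le
            rw [List.length_drop] at hlen
            have hkl : kw.toList ≠ [] := by simp [hv kw hkw]
            have hpos : 0 < kw.toList.length := List.length_pos_of_ne_nil hkl
            have hilt : i < cs.length := by
              by_contra hge
              rw [List.drop_eq_nil_of_le (by omega)] at hpre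
              exact hkl (List.prefix_nil.mp hpre)
            refine ⟨by positivity, by push_cast; omega, by push_cast; omega⟩
          have hpair := PySem.List.sorted_pairwise mtchs (fun x => x.1)
          rw [hsrt, List.pairwise_cons] at hpair
          obtain ⟨hm0rest, hrestP⟩ := hpair
          -- A's merge loop yields the maximal runs of the occurrence coverage
          obtain ⟨C1, C2, C3⟩ := pvMergeFold_good (cs.length : Int) rest m0 []
            (by simp) (fun x hx => hbounds x (by rw [List.mem_singleton.mp hx]; exact List.mem_cons_self))
            (fun x hx => hbounds x (List.mem_cons_of_mem _ hx)) hm0rest hrestP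
          set res := rest.foldl pvStep [m0] with hres
          have hGoodA : pvGood (cs.length : Int) (pvCovP kws cs) (res.reverse.map pvProj) := by
            refine ⟨?_, ?_, ?_⟩
            · exact List.Pairwise.map _ (fun a b h => h) C1
            · intro x hx
              obtain ⟨y, hy, rfl⟩ := List.mem_map.mp hx
              exact C2 y (List.mem_reverse.mp hy)
            · intro p
              have hrev : pvCovBy (res.reverse.map pvProj) p ↔ pvCovBy (res.map pvProj) p := by
                rw [pvCovBy_map, pvCovBy_map]
                constructor
                · rintro ⟨y, hy, hb⟩; exact ⟨y, List.mem_reverse.mp hy, hb⟩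
                · rintro ⟨y, hy, hb⟩; exact ⟨y, List.mem_reverse.mpr hy, hb⟩
              rw [hrev, C3 p]
              constructor
              · rintro ⟨k, hkmem, i, hpre, hb1, hb2⟩
                obtain ⟨kw, hkw, rfl⟩ := List.mem_map.mp hkmem
                have hy : ((i : Int), (i : Int) + kw.toList.length, kw.toList) ∈ m0 :: rest :=
                  hperm.mem_iff.mpr ((hchar _).mpr ⟨kw, hkw, i, hpre, rfl⟩)
                rcases List.mem_cons.mp hy with heq | hy
                · refine Or.inl ((pvCovBy_map [m0] p).mpr ⟨((i : Int), (i : Int) + kw.toList.length, kw.toList), ?_, hb1, hb2⟩)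
                  rw [heq]
                  exact List.mem_singleton_self _
                · exact Or.inr ((pvCovBy_map rest p).mpr ⟨_, hy, hb1, hb2⟩)
              · intro hcb
                have hy : ∃ y ∈ m0 :: rest, y.1 ≤ p ∧ p < y.2.1 := by
                  rcases hcb with hcb | hcb
                  · obtain ⟨y, hy, hb⟩ := (pvCovBy_map [m0] p).mp hcb
                    rw [List.mem_singleton] at hy
                    exact ⟨y, by rw [hy]; exact List.mem_cons_self, hb⟩
                  · obtain ⟨y, hy, hb⟩ := (pvCovBy_map rest p).mp hcb
                    exact ⟨y, List.mem_cons_of_mem _ hy, hb⟩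
                obtain ⟨y, hy, hb1, hb2⟩ := hy
                obtain ⟨kw, hkw, i, hpre, rfl⟩ := (hchar y).mp (hperm.mem_iff.mp hy)
                exact ⟨kw.toList, List.mem_map_of_mem hkw, i, hpre, hb1, hb2⟩
          have hEq : res.reverse.map pvProj
              = (pvScan (pvMark cs kws) 0).map (fun x => ((x.1 : Int), (x.2 : Int))) :=
            pvGood_unique (cs.length : Int) _ _ (pvCovP kws cs) hGoodA (pvB_good cs kws hk)
          unfold highlight_overlapping_no_regex_alt2_alt
          simp only []
          rw [← hcs, ← hvalid, ← hkws]
          rw [pvRender_congr cs res.reverse (pvScan (pvMark cs kws) 0) ([], 0) hEq]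

-- ===== VERDICT (by name: the statement is the Claim_ definition above) =====
theorem highlight_overlapping_no_regex_alt2_spec : Claim_equal_highlight_overlapping_no_regex_alt2 := by
  intro keywords text _
  exact pv_main keywords text
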